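-- pv_equiv track=rewrite | github.com/design4music/sni-platform | curation_trigger_analyzer.py | _analyze_window_themes
-- ===== SOURCE A (Python) =====
-- from typing import Any, Dict, List, Optional, Set, Tuple
--
-- def _analyze_window_themes(
--     clusters: List[Dict[str, Any]]
-- ) -> Dict[str, List[Dict[str, Any]]]:
--     """Group clusters in time window by shared themes"""
--     themes = {}
--
--     for cluster in clusters:
--         # Use primary keyword as theme
--         if cluster["keywords"]:
--             theme = cluster["keywords"][0]
--             if theme not in themes:
--                 themes[theme] = []
--             themes[theme].append(cluster)
--
--     # Only return themes with multiple clusters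
--     return {
--         theme: clusters for theme, clusters in themes.items() if len(clusters) >= 2
--     }
-- ===== SOURCE B (Python) =====
-- def _analyze_window_themes(clusters):
--     """Group clusters in time window by shared themes"""
--     # Pass 1: count how many clusters share each primary keyword.
--     counts = {}
--     for cluster in clusters:
--         if cluster["keywords"]:
--             theme = cluster["keywords"][0]
--             counts[theme] = counts.get(theme, 0) + 1
--     # Pass 2: collect only clusters whose theme is shared by >= 2 clusters.
--     result = {}
--     for cluster in clusters:
--         if cluster["keywords"]:
--             theme = cluster["keywords"][0]
--             if counts[theme] >= 2:
--                 result.setdefault(theme, []).append(cluster)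
--     return result
-- ===== Notes on version B (the rewrite author's own statement) =====
-- stated objective: alternative
-- what changed: B replaces A's accumulate-all-buckets-then-filter design by a two-pass scheme: one pass counts primary keywords, a second pass builds only the buckets whose count is >= 2, so no singleton bucket is ever materialised and no final filtering pass over the dict is needed.
import Mathlib
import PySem

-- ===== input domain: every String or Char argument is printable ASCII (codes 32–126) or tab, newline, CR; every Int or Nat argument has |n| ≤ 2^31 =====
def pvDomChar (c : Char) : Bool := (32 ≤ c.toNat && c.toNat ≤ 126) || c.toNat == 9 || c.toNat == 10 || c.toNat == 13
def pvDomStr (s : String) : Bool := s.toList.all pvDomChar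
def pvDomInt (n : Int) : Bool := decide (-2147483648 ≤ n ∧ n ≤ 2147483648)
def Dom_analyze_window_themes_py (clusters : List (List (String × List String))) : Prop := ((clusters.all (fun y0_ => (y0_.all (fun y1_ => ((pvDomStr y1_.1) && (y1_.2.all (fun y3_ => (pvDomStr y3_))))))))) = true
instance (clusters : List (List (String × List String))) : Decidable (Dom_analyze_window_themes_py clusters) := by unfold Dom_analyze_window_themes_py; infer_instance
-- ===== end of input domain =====

-- B counts primary keywords first and then builds only the shared (count ≥ 2) buckets in a
-- second pass, instead of accumulating every bucket and filtering at the end; same cost, different decomposition.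

-- ===== PORT A =====
def analyze_window_themes_py (clusters : List (List (String × List String))) : List (String × List (List (String × List String))) :=
  let themes : PySem.Dict String (List (List (String × List String))) :=
    clusters.foldl (fun themes cluster =>
      match (PySem.Dict.mk cluster).get? "keywords" with
      | none => themes        -- cluster["keywords"] raises KeyError: excluded by Pre_
      | some kws =>
        match kws with
        | [] => themes        -- empty list is falsy: skipped
        | theme :: _ =>       -- theme = cluster["keywords"][0]
          let themes := if themes.contains theme then themes else themes.insert theme []
          themes.modify theme [] (fun l => l ++ [cluster])) PySem.Dict.empty
  themes.items.filter (fun p => 2 ≤ p.2.length)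

-- ===== PORT B =====
def analyze_window_themes_py_alt (clusters : List (List (String × List String))) : List (String × List (List (String × List String))) :=
  let counts : PySem.Dict String Int :=
    clusters.foldl (fun counts cluster =>
      match (PySem.Dict.mk cluster).get? "keywords" with
      | none => counts
      | some [] => counts
      | some (theme :: _) => counts.modify theme 0 (· + 1)) PySem.Dict.empty
  let result : PySem.Dict String (List (List (String × List String))) :=
    clusters.foldl (fun result cluster =>
      match (PySem.Dict.mk cluster).get? "keywords" with
      | none => result
      | some [] => result
      | some (theme :: _) =>
        if 2 ≤ counts.getD theme 0 then
          (result.setdefault theme []).modify theme [] (fun l => l ++ [cluster])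
        else result) PySem.Dict.empty
  result.items

-- ===== PRECONDITION & SPEC =====
-- Pre_ excludes exactly the clusters without a "keywords" key, on which Python's cluster["keywords"] raises KeyError.
def Pre_analyze_window_themes_py (clusters : List (List (String × List String))) : Prop :=
  ∀ c ∈ clusters, "keywords" ∈ c.map Prod.fst
instance (clusters : List (List (String × List String))) : Decidable (Pre_analyze_window_themes_py clusters) := by unfold Pre_analyze_window_themes_py; infer_instance
def pvWitness_analyze_window_themes_py : (List (List (String × List String))) :=
  [[("keywords", ["war"]), ("id", ["1"])], [("keywords", ["war", "x"])], [("keywords", [])]]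
def Spec_analyze_window_themes_py (clusters : List (List (String × List String))) (out : List (String × List (List (String × List String)))) : Prop := out = analyze_window_themes_py_alt clusters
instance (clusters : List (List (String × List String))) (out : List (String × List (List (String × List String)))) : Decidable (Spec_analyze_window_themes_py clusters out) := by unfold Spec_analyze_window_themes_py; infer_instance

-- ===== CLAIM (what is proved, stated in full; the proofs are below) =====
def Claim_equal_analyze_window_themes_py : Prop := ∀ (clusters : List (List (String × List String))), Dom_analyze_window_themes_py clusters → Pre_analyze_window_themes_py clusters → Spec_analyze_window_themes_py clusters (analyze_window_themes_py clusters)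

-- ===== LEMMAS AND PROOFS =====

-- `toPair c = some (primary keyword, c)` when the cluster has a nonempty "keywords" list.
def toPair (c : List (String × List String)) : Option (String × List (String × List String)) :=
  match (PySem.Dict.mk c).get? "keywords" with
  | some (t :: _) => some (t, c)
  | _ => none

-- the grouping fold both programs reduce to
def grp (l : List (String × List (String × List String))) : PySem.Dict String (List (List (String × List String))) :=
  l.foldl (fun d p => d.modify p.1 [] (fun x => x ++ [p.2])) PySem.Dict.empty

lemma foldl_filterMap_elim {α β γ : Type} (f : α → Option β) (g : γ → β → γ)
    (l : List α) (init : γ) :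
    (l.filterMap f).foldl g init = l.foldl (fun acc a => (f a).elim acc (g acc)) init := by
  induction l generalizing init with
  | nil => rfl
  | cons a l ih => rw [List.filterMap_cons]; cases h : f a <;> simp [h, ih]

-- A's "if theme not in themes: themes[theme] = []; themes[theme].append(c)" is one modify
lemma insert_then_modify {ν : Type} (d : PySem.Dict String ν) (t : String) (d0 : ν) (f : ν → ν) :
    (if d.contains t then d else d.insert t d0).modify t d0 f = d.modify t d0 f := by
  by_cases hc : d.contains t = true
  · rw [if_pos hc]
  · rw [if_neg hc, PySem.Dict.modify, PySem.Dict.modify, PySem.Dict.getD_insert_self,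
      PySem.Dict.insert_insert_self, PySem.Dict.getD_of_not_contains d d0 (by simpa using hc)]

-- B's "result.setdefault(t, []).append(c)" is the same modify
lemma setdefault_then_modify {ν : Type} (d : PySem.Dict String ν) (t : String) (d0 : ν) (f : ν → ν) :
    (d.setdefault t d0).modify t d0 f = d.modify t d0 f := by
  by_cases hc : d.contains t = true
  · rw [PySem.Dict.setdefault_of_contains d d0 hc]
  · rw [PySem.Dict.setdefault_of_not_contains d d0 (by simpa using hc), PySem.Dict.modify,
      PySem.Dict.modify, PySem.Dict.getD_insert_self, PySem.Dict.insert_insert_self,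
      PySem.Dict.getD_of_not_contains d d0 (by simpa using hc)]

lemma A_eq (clusters : List (List (String × List String))) :
    analyze_window_themes_py clusters
      = (grp (clusters.filterMap toPair)).items.filter (fun p => 2 ≤ p.2.length) := by
  unfold analyze_window_themes_py grp
  simp only []
  rw [foldl_filterMap_elim]
  refine congrArg (List.filter _) (congrArg PySem.Dict.items
    (PySem.List.foldl_congr_mem _ _ _ _ ?_))
  intro d c _
  rcases h : (PySem.Dict.mk c).get? "keywords" with _ | (_ | ⟨t, ts⟩)
  · simp [toPair, h]
  · simp [toPair, h]
  · simp only [toPair, h, Option.elim]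
    exact insert_then_modify d t [] _

-- Set.ofList commutes with filter
lemma ofList_filter {α : Type} [BEq α] [LawfulBEq α] (p : α → Bool) (xs : List α) :
    PySem.Set.ofList (xs.filter p) = (PySem.Set.ofList xs).filter p := by
  induction xs using List.reverseRecOn with
  | nil => rfl
  | append_singleton xs x ih =>
    by_cases hp : p x = true
    · by_cases hx : x ∈ PySem.Set.ofList xs
      · simp [List.filter_append, PySem.Set.ofList_append_singleton, hp, hx, ih]
      · simp [List.filter_append, PySem.Set.ofList_append_singleton, hp, hx, ih]
    · by_cases hx : x ∈ PySem.Set.ofList xs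
      · simp [List.filter_append, PySem.Set.ofList_append_singleton, hp, hx, ih]
      · simp [List.filter_append, PySem.Set.ofList_append_singleton, hp, hx, ih]

lemma grp_items (l : List (String × List (String × List String))) :
    (grp l).items
      = (PySem.Set.ofList (l.map Prod.fst)).map
          (fun t => (t, (l.filter (fun p => p.1 == t)).map Prod.snd)) := by
  have hnd : (grp l).keys.Nodup := by
    unfold grp
    exact PySem.Dict.nodup_keys_foldl_modify_key l Prod.fst []
      (fun _ p => fun x => x ++ [p.2]) PySem.Dict.empty (by simp)
  rw [PySem.Dict.items_eq_map_keys _ hnd []]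
  have hk : (grp l).keys = PySem.Set.ofList (l.map Prod.fst) := by
    unfold grp
    rw [PySem.Dict.keys_foldl_modify_key l Prod.fst [] (fun _ p => fun x => x ++ [p.2])]
    rfl
  rw [hk]
  refine List.map_congr_left (fun t _ => ?_)
  have := PySem.Dict.getD_foldl_modify_append l PySem.Dict.empty t
  unfold grp
  rw [this, PySem.Dict.getD_empty, List.nil_append]

lemma B_eq (clusters : List (List (String × List String))) :
    analyze_window_themes_py_alt clusters
      = (grp ((clusters.filterMap toPair).filter
          (fun p => 2 ≤ ((clusters.filterMap toPair).map Prod.fst).count p.1))).items := by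
  unfold analyze_window_themes_py_alt
  simp only []
  set ks := (clusters.filterMap toPair).map Prod.fst with hks
  have hcnt : clusters.foldl (fun (counts : PySem.Dict String Int) cluster =>
      match (PySem.Dict.mk cluster).get? "keywords" with
      | none => counts
      | some [] => counts
      | some (theme :: _) => counts.modify theme 0 (· + 1)) PySem.Dict.empty
      = PySem.Dict.counter ks := by
    rw [PySem.Dict.counter_eq_foldl, hks, List.foldl_map, List.foldl_filterMap]
    refine PySem.List.foldl_congr_mem _ _ _ _ ?_
    intro d c _
    rcases h : (PySem.Dict.mk c).get? "keywords" with _ | (_ | ⟨t, ts⟩) <;> simp [toPair, h]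
  rw [hcnt]
  refine congrArg PySem.Dict.items ?_
  refine Eq.trans (PySem.List.foldl_congr_mem clusters _
      (fun d c => (toPair c).elim d (fun p =>
        if 2 ≤ (PySem.Dict.counter ks).getD p.1 0 then
          (d.setdefault p.1 []).modify p.1 [] (fun x => x ++ [p.2]) else d))
      PySem.Dict.empty ?_) ?_
  · intro d c _
    rcases h : (PySem.Dict.mk c).get? "keywords" with _ | (_ | ⟨t, ts⟩) <;> simp [toPair, h]
  · rw [← foldl_filterMap_elim]
    unfold grp
    have hstep : ∀ (d : PySem.Dict String (List (List (String × List String))))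
        (p : String × List (String × List String)),
        (if 2 ≤ (PySem.Dict.counter ks).getD p.1 0 then
            (d.setdefault p.1 []).modify p.1 [] (fun x => x ++ [p.2]) else d)
        = (if 2 ≤ ks.count p.1 then d.modify p.1 [] (fun x => x ++ [p.2]) else d) := by
      intro d p
      rw [PySem.Dict.getD_counter, setdefault_then_modify]
      by_cases h : 2 ≤ ks.count p.1
      · rw [if_pos h, if_pos (by exact_mod_cast h)]
      · rw [if_neg h, if_neg (by exact_mod_cast h)]
    have main : ∀ (l : List (String × List (String × List String)))
        (d : PySem.Dict String (List (List (String × List String)))),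
        l.foldl (fun d p => if 2 ≤ (PySem.Dict.counter ks).getD p.1 0 then
            (d.setdefault p.1 []).modify p.1 [] (fun x => x ++ [p.2]) else d) d
        = (l.filter (fun p => 2 ≤ ks.count p.1)).foldl
            (fun d p => d.modify p.1 [] (fun x => x ++ [p.2])) d := by
      intro l
      induction l with
      | nil => intro d; rfl
      | cons p l ih =>
        intro d
        rw [List.foldl_cons, hstep, List.filter_cons]
        by_cases h : 2 ≤ ks.count p.1
        · rw [if_pos h, if_pos (by simpa using h), List.foldl_cons, ih]
        · rw [if_neg h, if_neg (by simpa using h), ih]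
    exact main _ _

lemma count_eq_len (l : List (String × List (String × List String))) (t : String) :
    ((l.filter (fun p => p.1 == t)).map Prod.snd).length = (l.map Prod.fst).count t := by
  rw [List.length_map, List.count_eq_countP, List.countP_map, List.countP_eq_length_filter]
  rfl

-- ===== VERDICT (by name: the statement is the Claim_ definition above) =====
theorem analyze_window_themes_py_spec : Claim_equal_analyze_window_themes_py := by
  intro clusters _ _
  unfold Spec_analyze_window_themes_py
  rw [A_eq, B_eq, grp_items, grp_items]
  set l := clusters.filterMap toPair with hl
  set ks := l.map Prod.fst with hks
  set q : String → Bool := fun t => decide (2 ≤ ks.count t) with hq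
  have hfilt : l.filter (fun p => 2 ≤ ks.count p.1) = l.filter (fun p => q p.1) := rfl
  rw [hfilt]
  have hmapfst : (l.filter (fun p => q p.1)).map Prod.fst = ks.filter q := by
    rw [hks, List.filter_map]; rfl
  rw [hmapfst, ofList_filter, List.filter_map]
  have hpred : ∀ t ∈ PySem.Set.ofList ks,
      ((fun (p : String × List (List (String × List String))) => decide (2 ≤ p.2.length)) ∘
        (fun t => (t, (l.filter (fun p => p.1 == t)).map Prod.snd))) t = q t := by
    intro t _
    simp only [Function.comp]
    rw [count_eq_len l t, ← hks, hq]
  rw [List.filter_congr hpred]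
  refine List.map_congr_left (fun t ht => ?_)
  rcases List.mem_filter.mp ht with ⟨htmem, htq⟩
  have hqt : q t = true := htq
  congr 1
  -- buckets agree: every pair with key t passes the count filter
  rw [List.filter_comm]
  congr 1
  refine (List.filter_eq_self.mpr ?_).symm
  intro p hp
  have hpt : p.1 = t := by simpa using (List.mem_filter.mp hp).2
  rw [hpt]; exact hqt
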